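-- pv_equiv track=rewrite | github.com/alliyya/adventOfCode | 2015/day1.py | get_basement_pos
-- ===== SOURCE A (Python) =====
-- def get_basement_pos(sequence):
--     current_floor = 0
--     count = 0
--     for x in sequence:
--         if x=="(":
--             current_floor +=1
--         else:
--             current_floor -=1
--         count += 1
--         if current_floor == -1:
--             return count
-- ===== SOURCE B (Python) =====
-- def get_basement_pos(sequence):
--     # Two-phase: build the full prefix-sum floor list, then search it for -1.
--     floors = []
--     f = 0
--     for x in sequence:
--         f += 1 if x == '(' else -1
--         floors.append(f)
--     return next((i + 1 for i, v in enumerate(floors) if v == -1), None)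
-- ===== Notes on version B (the rewrite author's own statement) =====
-- stated objective: alternative
-- what changed: Replaces the fused early-returning counting loop with a two-phase decomposition: first build the full prefix-sum floor list, then search it for the first -1, returning its 1-based position or None.
import Mathlib
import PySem

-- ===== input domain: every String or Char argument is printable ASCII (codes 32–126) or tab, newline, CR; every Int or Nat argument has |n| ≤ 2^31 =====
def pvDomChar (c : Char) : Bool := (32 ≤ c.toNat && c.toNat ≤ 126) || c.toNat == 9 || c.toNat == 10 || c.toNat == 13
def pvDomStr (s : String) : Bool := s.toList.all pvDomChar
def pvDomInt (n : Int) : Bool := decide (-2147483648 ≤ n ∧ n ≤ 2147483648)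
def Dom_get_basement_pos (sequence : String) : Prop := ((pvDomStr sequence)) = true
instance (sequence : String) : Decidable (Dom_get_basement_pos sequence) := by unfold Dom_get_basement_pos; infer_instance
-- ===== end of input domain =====

-- B: two-phase decomposition (build full prefix-sum floor list, then search for -1) instead of A's fused early-return loop; same values everywhere.
-- ===== PORT A =====
def pvGoA : List Char → Int → Int → Option Int
  | [], _, _ => none
  | x :: xs, floor, count =>
    let floor' := if x = '(' then floor + 1 else floor - 1
    let count' := count + 1
    if floor' = -1 then some count' else pvGoA xs floor' count'

def get_basement_pos (sequence : String) : Option Int :=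
  pvGoA sequence.toList 0 0

-- ===== PORT B =====
-- phase 1: prefix-sum list of floors
def pvFloors : List Char → Int → List Int
  | [], _ => []
  | x :: xs, f =>
    let f' := f + (if x = '(' then 1 else -1)
    f' :: pvFloors xs f'

-- phase 2: first index (1-based) whose value is -1
def pvFindNeg : List Int → Int → Option Int
  | [], _ => none
  | v :: vs, i => if v = -1 then some (i + 1) else pvFindNeg vs (i + 1)

def get_basement_pos_alt (sequence : String) : Option Int :=
  pvFindNeg (pvFloors sequence.toList 0) 0

-- ===== PRECONDITION & SPEC =====
def Spec_get_basement_pos (sequence : String) (out : Option Int) : Prop := out = get_basement_pos_alt sequence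
instance (sequence : String) (out : Option Int) : Decidable (Spec_get_basement_pos sequence out) := by unfold Spec_get_basement_pos; infer_instance

-- ===== CLAIM (what is proved, stated in full; the proofs are below) =====
def Claim_equal_get_basement_pos : Prop := ∀ (sequence : String), Dom_get_basement_pos sequence → Spec_get_basement_pos sequence (get_basement_pos sequence)

-- ===== LEMMAS AND PROOFS =====

-- ===== VERDICT (by name: the statement is the Claim_ definition above) =====
theorem pvGo_eq (xs : List Char) : ∀ f c, pvGoA xs f c = pvFindNeg (pvFloors xs f) c := by
  induction xs with
  | nil => intro f c; rfl
  | cons x xs ih =>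
    intro f c
    simp only [pvGoA, pvFloors, pvFindNeg]
    have hf : (if x = '(' then f + 1 else f - 1) = f + (if x = '(' then (1:Int) else -1) := by
      split <;> ring
    rw [hf]
    split <;> split <;> first | rfl | exact ih _ _

theorem get_basement_pos_spec : Claim_equal_get_basement_pos := by
  intro s _
  unfold Spec_get_basement_pos get_basement_pos get_basement_pos_alt
  exact pvGo_eq s.toList 0 0
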